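-- pv_equiv track=rewrite | github.com/Lincoln-LM/RNG-Python-Scripts | gen6_protect.py | reverse_tinymt
-- ===== SOURCE A (Python) =====
-- def reverse_tinymt(state):
--     state_copy = state.copy()
--     y_final = state_copy[3]
--
--     if y_final & 1:
--         state_copy[1] ^= 0x8f7011ee
--         state_copy[2] ^= 0xfc78ff1f
--
--     x_final = state_copy[2] ^ (y_final << 10)
--
--     state_copy[2] = state_copy[1]
--     state_copy[1] = state_copy[0]
--
--     x_before = 0
--     last_used_bit = 0
--     for bit in range(0,32):
--         last_used_bit = (x_final ^ (last_used_bit << 1)) & (1 << bit)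
--         x_before |= last_used_bit
--
--     y_middle = y_final ^ x_final
--     y_before = 0
--     last_used_bit = 0
--     for bit in range(31,-1,-1):
--         last_used_bit = (y_middle ^ (last_used_bit >> 1)) & (1 << bit)
--         y_before |= last_used_bit
--
--     state_copy[0] = x_before ^ state_copy[1] ^ state_copy[2]
--     state_copy[3] = y_before
--
--     return state_copy
-- ===== SOURCE B (Python) =====
-- def reverse_tinymt(state):
--     out = state.copy()
--     y_final = out[3]
--
--     if y_final & 1:
--         out[1] ^= 0x8f7011ee
--         out[2] ^= 0xfc78ff1f
--
--     x_final = out[2] ^ (y_final << 10)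
--
--     out[2] = out[1]
--     out[1] = out[0]
--
--     # closed-form inverse of v -> v ^ (v << 1) on 32 bits (prefix-XOR of bits)
--     x_before = x_final & 0xFFFFFFFF
--     for k in (1, 2, 4, 8, 16):
--         x_before = (x_before ^ (x_before << k)) & 0xFFFFFFFF
--
--     # closed-form inverse of v -> v ^ (v >> 1) on 32 bits (suffix-XOR of bits)
--     y_before = (y_final ^ x_final) & 0xFFFFFFFF
--     for k in (1, 2, 4, 8, 16):
--         y_before ^= y_before >> k
--
--     out[0] = x_before ^ out[1] ^ out[2]
--     out[3] = y_before
--     return out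
-- ===== Notes on version B (the rewrite author's own statement) =====
-- stated objective: alternative
-- what changed: Each 32-iteration per-bit reconstruction loop is replaced by the closed-form xor-shift inverse of the (v ^ (v<<1)) / (v ^ (v>>1)) tempering step: five doubling shift-XOR steps (by 1,2,4,8,16) masked to 32 bits compute the same prefix/suffix bit-XORs in parallel.
import Mathlib
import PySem

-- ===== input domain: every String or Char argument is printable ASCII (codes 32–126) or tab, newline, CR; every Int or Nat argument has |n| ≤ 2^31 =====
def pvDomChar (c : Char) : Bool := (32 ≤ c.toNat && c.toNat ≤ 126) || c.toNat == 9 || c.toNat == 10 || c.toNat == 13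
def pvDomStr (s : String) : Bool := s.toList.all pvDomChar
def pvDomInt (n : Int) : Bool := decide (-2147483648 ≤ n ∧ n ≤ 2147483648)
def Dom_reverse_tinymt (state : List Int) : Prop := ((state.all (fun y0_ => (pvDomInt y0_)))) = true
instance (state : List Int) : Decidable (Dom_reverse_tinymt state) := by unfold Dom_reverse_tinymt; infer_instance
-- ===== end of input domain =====

-- B replaces each 32-iteration per-bit reconstruction loop with the 5-step xor-shift
-- closed-form inverse (prefix/suffix bit-XOR via doubling shifts); same return value, proved equal.


-- ===== PORT A =====
-- the first per-bit loop of A: for bit in range(0,32), state (x_before, last_used_bit)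
def pvStepX (x : Int) (acc : Int × Int) (bit : Int) : Int × Int :=
  let l := PySem.Int.band (PySem.Int.bxor x (acc.2 <<< (1:Nat))) ((1:Int) <<< bit.toNat)
  (PySem.Int.bor acc.1 l, l)
def pvLoopX (x : Int) : Int := ((PySem.List.pyRange 0 32 1).foldl (pvStepX x) (0, 0)).1
-- the second per-bit loop of A: for bit in range(31,-1,-1), state (y_before, last_used_bit)
def pvStepY (y : Int) (acc : Int × Int) (bit : Int) : Int × Int :=
  let l := PySem.Int.band (PySem.Int.bxor y (acc.2 >>> (1:Nat))) ((1:Int) <<< bit.toNat)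
  (PySem.Int.bor acc.1 l, l)
def pvLoopY (y : Int) : Int := ((PySem.List.pyRange 31 (-1) (-1)).foldl (pvStepY y) (0, 0)).1

def reverse_tinymt (state : List Int) : List Int :=
  let sc := state
  let y_final := PySem.List.pyGetD sc 3 0
  let sc := if PySem.Int.band y_final 1 ≠ 0 then
      let sc := PySem.List.pySetD sc 1 (PySem.Int.bxor (PySem.List.pyGetD sc 1 0) 0x8f7011ee)
      PySem.List.pySetD sc 2 (PySem.Int.bxor (PySem.List.pyGetD sc 2 0) 0xfc78ff1f)
    else sc
  let x_final := PySem.Int.bxor (PySem.List.pyGetD sc 2 0) (y_final <<< (10:Nat))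
  let sc := PySem.List.pySetD sc 2 (PySem.List.pyGetD sc 1 0)
  let sc := PySem.List.pySetD sc 1 (PySem.List.pyGetD sc 0 0)
  let x_before := pvLoopX x_final
  let y_middle := PySem.Int.bxor y_final x_final
  let y_before := pvLoopY y_middle
  let sc := PySem.List.pySetD sc 0
    (PySem.Int.bxor (PySem.Int.bxor x_before (PySem.List.pyGetD sc 1 0)) (PySem.List.pyGetD sc 2 0))
  PySem.List.pySetD sc 3 y_before

-- ===== PORT B =====
-- closed-form inverse of v -> v ^ (v << 1) on 32 bits
def pvInvShl (x : Int) : Int :=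
  [1, 2, 4, 8, 16].foldl
    (fun v (k : Nat) => PySem.Int.band (PySem.Int.bxor v (v <<< k)) 0xFFFFFFFF)
    (PySem.Int.band x 0xFFFFFFFF)
-- closed-form inverse of v -> v ^ (v >> 1) on 32 bits
def pvInvShr (y : Int) : Int :=
  [1, 2, 4, 8, 16].foldl
    (fun v (k : Nat) => PySem.Int.bxor v (v >>> k))
    (PySem.Int.band y 0xFFFFFFFF)

def reverse_tinymt_alt (state : List Int) : List Int :=
  let out := state
  let y_final := PySem.List.pyGetD out 3 0
  let out := if PySem.Int.band y_final 1 ≠ 0 then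
      let out := PySem.List.pySetD out 1 (PySem.Int.bxor (PySem.List.pyGetD out 1 0) 0x8f7011ee)
      PySem.List.pySetD out 2 (PySem.Int.bxor (PySem.List.pyGetD out 2 0) 0xfc78ff1f)
    else out
  let x_final := PySem.Int.bxor (PySem.List.pyGetD out 2 0) (y_final <<< (10:Nat))
  let out := PySem.List.pySetD out 2 (PySem.List.pyGetD out 1 0)
  let out := PySem.List.pySetD out 1 (PySem.List.pyGetD out 0 0)
  let x_before := pvInvShl x_final
  let y_before := pvInvShr (PySem.Int.bxor y_final x_final)
  let out := PySem.List.pySetD out 0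
    (PySem.Int.bxor (PySem.Int.bxor x_before (PySem.List.pyGetD out 1 0)) (PySem.List.pyGetD out 2 0))
  PySem.List.pySetD out 3 y_before

-- ===== PRECONDITION & SPEC =====
-- Pre_ excludes only lists of length < 4, on which Python A raises IndexError.
def Pre_reverse_tinymt (state : List Int) : Prop := 4 ≤ state.length
instance (state : List Int) : Decidable (Pre_reverse_tinymt state) := by unfold Pre_reverse_tinymt; infer_instance
def pvWitness_reverse_tinymt : List Int := [1, 2, 3, 4]

def Spec_reverse_tinymt (state : List Int) (out : List Int) : Prop := out = reverse_tinymt_alt state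
instance (state : List Int) (out : List Int) : Decidable (Spec_reverse_tinymt state out) := by unfold Spec_reverse_tinymt; infer_instance

-- ===== CLAIM (what is proved, stated in full; the proofs are below) =====
def Claim_equal_reverse_tinymt : Prop := ∀ (state : List Int), Dom_reverse_tinymt state → Pre_reverse_tinymt state → Spec_reverse_tinymt state (reverse_tinymt state)

-- ===== LEMMAS AND PROOFS =====

theorem pvNegSucc_eq (w : Nat) : -(w:Int) - 1 = Int.negSucc w := by
  rw [Int.negSucc_eq]; ring

theorem pvNegSuccSub (u : Nat) : (-Int.negSucc u - 1).toNat = u := by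
  rw [Int.negSucc_eq]; omega

theorem pvBxor_ofNat_ofNat (u v : Nat) :
    PySem.Int.bxor (Int.ofNat u) (Int.ofNat v) = Int.ofNat (u ^^^ v) := by
  simp only [PySem.Int.bxor]
  rw [if_pos (show (0:Int) ≤ Int.ofNat u from Int.natCast_nonneg u), if_pos (show (0:Int) ≤ Int.ofNat v from Int.natCast_nonneg v)]
  rfl

theorem pvBxor_ofNat_negSucc (u v : Nat) :
    PySem.Int.bxor (Int.ofNat u) (Int.negSucc v) = Int.negSucc (u ^^^ v) := by
  simp only [PySem.Int.bxor]
  rw [if_pos (show (0:Int) ≤ Int.ofNat u from Int.natCast_nonneg u), if_neg (by rw [Int.negSucc_eq]; omega), pvNegSuccSub]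
  have : (Int.ofNat u).toNat = u := rfl
  rw [this, ← pvNegSucc_eq]

theorem pvBxor_negSucc_ofNat (u v : Nat) :
    PySem.Int.bxor (Int.negSucc u) (Int.ofNat v) = Int.negSucc (u ^^^ v) := by
  simp only [PySem.Int.bxor]
  rw [if_neg (by rw [Int.negSucc_eq]; omega), if_pos (show (0:Int) ≤ Int.ofNat v from Int.natCast_nonneg v), pvNegSuccSub]
  have : (Int.ofNat v).toNat = v := rfl
  rw [this, ← pvNegSucc_eq]

theorem pvBxor_negSucc_negSucc (u v : Nat) :
    PySem.Int.bxor (Int.negSucc u) (Int.negSucc v) = Int.ofNat (u ^^^ v) := by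
  simp only [PySem.Int.bxor]
  rw [if_neg (by rw [Int.negSucc_eq]; omega), if_neg (by rw [Int.negSucc_eq]; omega),
    pvNegSuccSub, pvNegSuccSub]
  rfl

theorem pvBxor_testBit (a b : Int) (i : Nat) :
    (PySem.Int.bxor a b).testBit i = xor (a.testBit i) (b.testBit i) := by
  cases a with
  | ofNat u =>
    cases b with
    | ofNat v => rw [pvBxor_ofNat_ofNat]; simp [Int.testBit, Nat.testBit_xor]
    | negSucc v =>
      rw [pvBxor_ofNat_negSucc]
      simp only [Int.testBit, Nat.testBit_xor]
      cases u.testBit i <;> cases v.testBit i <;> rfl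
  | negSucc u =>
    cases b with
    | ofNat v =>
      rw [pvBxor_negSucc_ofNat]
      simp only [Int.testBit, Nat.testBit_xor]
      cases u.testBit i <;> cases v.testBit i <;> rfl
    | negSucc v =>
      rw [pvBxor_negSucc_negSucc]
      simp only [Int.testBit, Nat.testBit_xor]
      cases u.testBit i <;> cases v.testBit i <;> rfl

theorem pvBand_pow_testBit (a : Int) (b : Nat) :
    PySem.Int.band a ((2^b : Nat) : Int) = (((a.testBit b).toNat * 2^b : Nat) : Int) := by
  cases a with
  | ofNat u =>
    have : (Int.ofNat u) = ((u : Nat) : Int) := rfl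
    rw [this, PySem.Int.band_natCast]
    simp [Int.testBit, Nat.and_two_pow]
  | negSucc u =>
    simp only [PySem.Int.band]
    rw [if_neg (by rw [Int.negSucc_eq]; omega), if_pos (Int.natCast_nonneg _), pvNegSuccSub]
    rw [Int.toNat_natCast, Nat.two_pow_and]
    simp only [Int.testBit]
    cases hu : u.testBit b <;> simp

theorem pvBand_mask (x : Int) :
    ∃ n : Nat, PySem.Int.band x 0xFFFFFFFF = (n:Int) ∧ n < 2^32 ∧
      ∀ i, n.testBit i = (decide (i < 32) && x.testBit i) := by
  have hm : (0xFFFFFFFF : Int) = ((2^32 - 1 : Nat) : Int) := by norm_num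
  cases x with
  | ofNat u =>
    refine ⟨u % 2^32, ?_, Nat.mod_lt _ (by norm_num), ?_⟩
    · have h0 : (Int.ofNat u) = ((u : Nat) : Int) := rfl
      rw [h0, hm, PySem.Int.band_natCast, Nat.and_two_pow_sub_one_eq_mod]
    · intro i
      rw [Nat.testBit_mod_two_pow]
      simp [Int.testBit]
  | negSucc u =>
    have hmod : u % 2^32 < 2^32 := Nat.mod_lt _ (by norm_num)
    refine ⟨2^32 - (u % 2^32 + 1), ?_, by omega, ?_⟩
    · simp only [PySem.Int.band]
      rw [if_neg (by rw [Int.negSucc_eq]; omega), if_pos (by rw [hm]; omega), pvNegSuccSub]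
      rw [hm, Int.toNat_natCast, Nat.and_comm, Nat.and_two_pow_sub_one_eq_mod]
      congr 1
      omega
    · intro i
      rw [Nat.testBit_two_pow_sub_succ hmod, Nat.testBit_mod_two_pow]
      simp only [Int.testBit]
      by_cases h : i < 32 <;> simp [h]

-- XOR of the bits j-w+1 .. j of n (window truncated at bit 0)
def pvWx (n : Nat) (j : Nat) : Nat → Bool
  | 0 => false
  | w+1 => xor (pvWx n j w) (if w ≤ j then n.testBit (j - w) else false)

-- XOR of the bits j .. j+w-1 of n
def pvSw (n : Nat) (j : Nat) : Nat → Bool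
  | 0 => false
  | w+1 => xor (pvSw n j w) (n.testBit (j + w))

theorem pvWx_add (n j a b : Nat) :
    pvWx n j (a + b) = xor (pvWx n j a) (if a ≤ j then pvWx n (j - a) b else false) := by
  induction b with
  | zero => cases h : decide (a ≤ j) <;> simp_all [pvWx]
  | succ b ih =>
    show pvWx n j ((a + b) + 1) = _
    rw [pvWx, ih]
    by_cases ha : a ≤ j
    · simp only [if_pos ha]
      rw [show pvWx n (j-a) (b+1) = xor (pvWx n (j-a) b) (if b ≤ j - a then n.testBit (j-a-b) else false) from rfl]
      by_cases hb : b ≤ j - a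
      · rw [if_pos hb, if_pos (by omega), show j - (a+b) = j - a - b from by omega, Bool.xor_assoc]
      · rw [if_neg hb, if_neg (by omega)]
        simp
    · simp only [if_neg ha]
      rw [if_neg (by omega)]
      simp

theorem pvSw_add (n j a b : Nat) :
    pvSw n j (a + b) = xor (pvSw n j a) (pvSw n (j + a) b) := by
  induction b with
  | zero => simp [pvSw]
  | succ b ih =>
    show pvSw n j ((a + b) + 1) = _
    rw [pvSw, ih]
    show _ = xor _ (pvSw n (j+a) (b+1))
    rw [pvSw]
    have : j + (a + b) = j + a + b := by omega
    rw [this, Bool.xor_assoc]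

theorem pvWx_succ_succ (n j w : Nat) :
    pvWx n (j+1) (w+1) = xor (n.testBit (j+1)) (pvWx n j w) := by
  induction w with
  | zero => simp [pvWx]
  | succ w ih =>
    show pvWx n (j+1) ((w+1)+1) = _
    rw [pvWx, ih]
    by_cases hw : w ≤ j
    · rw [if_pos (by omega), pvWx, if_pos hw]
      have : j + 1 - (w + 1) = j - w := by omega
      rw [this, Bool.xor_assoc]
    · rw [if_neg (by omega), pvWx, if_neg hw]
      simp

-- prefix XOR of the bits 0..j of x (A's first loop values)
def pvPfx (x : Int) : Nat → Bool
  | 0 => x.testBit 0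
  | j+1 => xor (x.testBit (j+1)) (pvPfx x j)

-- suffix XOR of the bits (31-k)..31 of y (A's second loop values)
def pvSfx (y : Int) : Nat → Bool
  | 0 => y.testBit 31
  | k+1 => xor (y.testBit (31 - (k+1))) (pvSfx y k)

def pvAx (x : Int) : Nat → Nat
  | 0 => 0
  | m+1 => pvAx x m ||| ((pvPfx x m).toNat <<< m)

def pvLx (x : Int) : Nat → Nat
  | 0 => 0
  | m+1 => (pvPfx x m).toNat <<< m

def pvAy (y : Int) : Nat → Nat
  | 0 => 0
  | k+1 => pvAy y k ||| ((pvSfx y k).toNat <<< (31 - k))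

def pvLy (y : Int) : Nat → Nat
  | 0 => 0
  | k+1 => (pvSfx y k).toNat <<< (31 - k)

theorem pvBoolShl_testBit (c : Bool) (m j : Nat) :
    (c.toNat <<< m).testBit j = (decide (j = m) && c) := by
  rw [Nat.testBit_shiftLeft]
  by_cases h : m ≤ j
  · rw [decide_eq_true (by omega : j ≥ m)]
    cases c
    · simp
    · show Nat.testBit 1 (j - m) = _
      rw [show (1:Nat) = 2^0 from rfl, Nat.testBit_two_pow]
      by_cases hj : j = m <;> simp [hj] <;> omega
  · have : ¬ (j ≥ m) := h
    simp [this]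
    omega

theorem pvAx_testBit (x : Int) (m j : Nat) :
    (pvAx x m).testBit j = (decide (j < m) && pvPfx x j) := by
  induction m with
  | zero => simp [pvAx]
  | succ m ih =>
    rw [pvAx, Nat.testBit_or, ih, pvBoolShl_testBit]
    by_cases hj : j = m
    · subst hj; simp
    · by_cases hlt : j < m
      · rw [decide_eq_true hlt, decide_eq_true (show j < m + 1 by omega), decide_eq_false hj]
        simp
      · rw [decide_eq_false hlt, decide_eq_false (show ¬ j < m + 1 by omega), decide_eq_false hj]
        simp

theorem pvAy_testBit (y : Int) (k j : Nat) (hk : k ≤ 32) :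
    (pvAy y k).testBit j = (decide (32 - k ≤ j ∧ j < 32) && pvSfx y (31 - j)) := by
  induction k with
  | zero => simp [pvAy]
  | succ k ih =>
    rw [pvAy, Nat.testBit_or, ih (by omega), pvBoolShl_testBit]
    by_cases hj : j = 31 - k
    · subst hj
      rw [decide_eq_false (show ¬(32 - k ≤ 31 - k ∧ 31 - k < 32) by omega)]
      rw [decide_eq_true (show 32 - (k+1) ≤ 31 - k ∧ 31 - k < 32 by omega)]
      rw [show 31 - (31 - k) = k from by omega]
      simp
    · rw [decide_eq_false hj]
      have h2 : decide (32 - k ≤ j ∧ j < 32) = decide (32 - (k+1) ≤ j ∧ j < 32) := by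
        apply decide_eq_decide.mpr; omega
      rw [h2]
      simp

theorem pvOneShl (b : Nat) : (1:Int) <<< b = ((2^b : Nat) : Int) := by
  rw [Int.shiftLeft_eq]; push_cast; ring

theorem pvShlCast (n k : Nat) : ((n:Int) <<< k) = ((n <<< k : Nat) : Int) := rfl
theorem pvShrCast (n k : Nat) : ((n:Int) >>> k) = ((n >>> k : Nat) : Int) := rfl
theorem pvTestBitCast (n i : Nat) : ((n:Int)).testBit i = n.testBit i := rfl

-- value of A's first-loop bit extraction at step m
theorem pvStepX_val (x : Int) (m : Nat) :
    pvStepX x (((pvAx x m : Nat) : Int), ((pvLx x m : Nat) : Int)) ((m : Nat) : Int)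
      = (((pvAx x (m+1) : Nat) : Int), ((pvLx x (m+1) : Nat) : Int)) := by
  have htn : (((m : Nat) : Int)).toNat = m := by omega
  have hlast : ((pvLx x m <<< 1).testBit m) = (match m with | 0 => false | m'+1 => pvPfx x m') := by
    cases m with
    | zero => simp [pvLx]
    | succ m' =>
      rw [pvLx, ← Nat.shiftLeft_add, pvBoolShl_testBit]
      simp
  have hbit : (PySem.Int.bxor x (((pvLx x m : Nat) : Int) <<< (1:Nat))).testBit m = pvPfx x m := by
    rw [pvShlCast, pvBxor_testBit, pvTestBitCast, hlast]
    cases m with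
    | zero => simp [pvPfx]
    | succ m' => rw [pvPfx]
  show (_, _) = _
  simp only [htn, pvOneShl, pvBand_pow_testBit, hbit, Prod.mk.injEq]
  constructor
  · rw [PySem.Int.bor_natCast]
    rw [pvAx]
    congr 1
    rw [Nat.shiftLeft_eq]
  · rw [pvLx]
    congr 1
    rw [Nat.shiftLeft_eq]

theorem pvLoopX_char (x : Int) (m : Nat) :
    ((List.range m).map Int.ofNat).foldl (pvStepX x) (0, 0)
      = (((pvAx x m : Nat) : Int), ((pvLx x m : Nat) : Int)) := by
  induction m with
  | zero => simp [pvAx, pvLx]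
  | succ m ih =>
    rw [List.range_succ, List.map_append, List.foldl_append, ih]
    simp only [List.map_cons, List.map_nil, List.foldl_cons, List.foldl_nil]
    exact pvStepX_val x m

theorem pvStepY_val (y : Int) (k : Nat) (hk : k ≤ 31) :
    pvStepY y (((pvAy y k : Nat) : Int), ((pvLy y k : Nat) : Int)) ((31 - k : Nat) : Int)
      = (((pvAy y (k+1) : Nat) : Int), ((pvLy y (k+1) : Nat) : Int)) := by
  have htn : (((31 - k : Nat) : Int)).toNat = 31 - k := by omega
  have hlast : ((pvLy y k >>> 1).testBit (31 - k))
      = (match k with | 0 => false | k'+1 => pvSfx y k') := by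
    cases k with
    | zero => simp [pvLy]
    | succ k' =>
      rw [pvLy, Nat.testBit_shiftRight, show 1 + (31 - (k'+1)) = 31 - k' from by omega,
        pvBoolShl_testBit]
      simp
  have hbit : (PySem.Int.bxor y (((pvLy y k : Nat) : Int) >>> (1:Nat))).testBit (31 - k) = pvSfx y k := by
    rw [pvShrCast, pvBxor_testBit, pvTestBitCast, hlast]
    cases k with
    | zero => simp [pvSfx]
    | succ k' => rw [pvSfx]
  show (_, _) = _
  simp only [htn, pvOneShl, pvBand_pow_testBit, hbit, Prod.mk.injEq]
  constructor
  · rw [PySem.Int.bor_natCast, pvAy]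
    congr 1
    rw [Nat.shiftLeft_eq]
  · rw [pvLy]
    congr 1
    rw [Nat.shiftLeft_eq]

theorem pvLoopY_char (y : Int) : ∀ k, k ≤ 32 →
    ((List.range' (32-k) k 1).map Int.ofNat).foldr (fun bit acc => pvStepY y acc bit) (0, 0)
      = (((pvAy y k : Nat) : Int), ((pvLy y k : Nat) : Int)) := by
  intro k
  induction k with
  | zero => intro _; simp [pvAy, pvLy]
  | succ k ih =>
    intro hk
    rw [show (32 - (k+1)) = 31 - k from by omega, List.range'_succ,
      show 31 - k + 1 = 32 - k from by omega]
    simp only [List.map_cons, List.foldr_cons]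
    rw [ih (by omega)]
    exact pvStepY_val y k (by omega)

theorem pvCastStepX (v k : Nat) :
    PySem.Int.band (PySem.Int.bxor ((v:Nat):Int) (((v:Nat):Int) <<< k)) 0xFFFFFFFF
      = (((v ^^^ v <<< k) &&& 4294967295 : Nat) : Int) := by
  rw [pvShlCast, PySem.Int.bxor_natCast,
    show (0xFFFFFFFF:Int) = ((4294967295:Nat):Int) from by norm_num, PySem.Int.band_natCast]

theorem pvCastStepY (v k : Nat) :
    PySem.Int.bxor ((v:Nat):Int) (((v:Nat):Int) >>> k) = (((v ^^^ v >>> k) : Nat) : Int) := by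
  rw [pvShrCast, PySem.Int.bxor_natCast]

theorem pvChainX_step (n v w : Nat)
    (hv : ∀ i, v.testBit i = (decide (i < 32) && pvWx n i w)) :
    ∀ i, ((v ^^^ (v <<< w)) &&& 4294967295).testBit i
        = (decide (i < 32) && pvWx n i (w + w)) := by
  intro i
  rw [show (4294967295 : Nat) = 2^32 - 1 from by norm_num, Nat.testBit_and,
    Nat.testBit_two_pow_sub_one, Nat.testBit_xor, Nat.testBit_shiftLeft, hv, hv,
    pvWx_add n i w w]
  by_cases h32 : i < 32
  · by_cases hw : w ≤ i
    · rw [decide_eq_true h32, decide_eq_true (show i ≥ w from hw), if_pos hw,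
        decide_eq_true (show i - w < 32 by omega)]
      simp
    · rw [decide_eq_true h32, decide_eq_false (show ¬ i ≥ w from hw), if_neg hw]
      simp
  · simp [h32]

theorem pvChainY_step (n v w : Nat) (hv : ∀ i, v.testBit i = pvSw n i w) :
    ∀ i, (v ^^^ (v >>> w)).testBit i = pvSw n i (w + w) := by
  intro i
  rw [Nat.testBit_xor, Nat.testBit_shiftRight, hv, hv, pvSw_add n i w w, Nat.add_comm w i]

theorem pvWx_full (n j : Nat) (h : j < 32) : pvWx n j 32 = pvWx n j (j+1) := by
  rw [show (32:Nat) = (j+1) + (31-j) from by omega, pvWx_add, if_neg (by omega)]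
  simp

theorem pvWx_pfx (n : Nat) (x : Int)
    (hbits : ∀ i, n.testBit i = (decide (i < 32) && x.testBit i)) :
    ∀ j, j < 32 → pvWx n j (j+1) = pvPfx x j := by
  intro j
  induction j with
  | zero =>
    intro _
    have h0 := hbits 0
    simp at h0
    simp [pvWx, pvPfx, h0]
  | succ j ih =>
    intro hj
    rw [pvWx_succ_succ, ih (by omega), pvPfx]
    have := hbits (j+1)
    rw [decide_eq_true hj] at this
    simp at this
    rw [this]

theorem pvSw_high (n : Nat) (hlt : n < 2^32) (j : Nat) (hj : 32 ≤ j) :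
    ∀ w, pvSw n j w = false := by
  intro w
  induction w with
  | zero => rfl
  | succ w ih =>
    rw [pvSw, ih, Nat.testBit_eq_false_of_lt
      (lt_of_lt_of_le hlt (Nat.pow_le_pow_right (by norm_num) (by omega)))]
    rfl

theorem pvSw_sfx (n : Nat) (y : Int)
    (hbits : ∀ i, n.testBit i = (decide (i < 32) && y.testBit i)) :
    ∀ k, k ≤ 31 → pvSw n (31-k) (k+1) = pvSfx y k := by
  intro k
  induction k with
  | zero =>
    intro _
    have h0 := hbits 31
    simp at h0
    simp [pvSw, pvSfx, h0]
  | succ k ih =>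
    intro hk
    rw [show k+1+1 = 1 + (k+1) from by omega, pvSw_add,
      show 31 - (k+1) + 1 = 31 - k from by omega, ih (by omega), pvSfx]
    have hb := hbits (31-(k+1))
    rw [decide_eq_true (show 31-(k+1) < 32 by omega)] at hb
    simp at hb
    simp [pvSw, hb]

theorem pvLoopX_eq_pvInvShl (x : Int) : pvLoopX x = pvInvShl x := by
  obtain ⟨n, hb, hlt, hbits⟩ := pvBand_mask x
  have h1 : ∀ i, n.testBit i = (decide (i < 32) && pvWx n i 1) := by
    intro i
    by_cases h : i < 32
    · simp [pvWx, h]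
    · rw [Nat.testBit_eq_false_of_lt
        (lt_of_lt_of_le hlt (Nat.pow_le_pow_right (by norm_num) (by omega)))]
      simp [h]
  have h2 := pvChainX_step n _ 1 h1
  have h4 := pvChainX_step n _ 2 h2
  have h8 := pvChainX_step n _ 4 h4
  have h16 := pvChainX_step n _ 8 h8
  have h32 := pvChainX_step n _ 16 h16
  unfold pvLoopX pvInvShl
  rw [show PySem.List.pyRange 0 32 1 = (List.range 32).map Int.ofNat from by decide,
    pvLoopX_char x 32, hb]
  simp only [List.foldl_cons, List.foldl_nil, pvCastStepX]
  show ((pvAx x 32 : Nat) : Int) = _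
  congr 1
  apply Nat.eq_of_testBit_eq
  intro i
  rw [pvAx_testBit, h32 i]
  by_cases h : i < 32
  · rw [decide_eq_true h]
    rw [show pvWx n i (16+16) = pvWx n i 32 from rfl, pvWx_full n i h, pvWx_pfx n x hbits i h]
  · simp [h]

theorem pvLoopY_eq_pvInvShr (y : Int) : pvLoopY y = pvInvShr y := by
  obtain ⟨n, hb, hlt, hbits⟩ := pvBand_mask y
  have h1 : ∀ i, n.testBit i = pvSw n i 1 := by
    intro i; simp [pvSw]
  have h2 := pvChainY_step n _ 1 h1
  have h4 := pvChainY_step n _ 2 h2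
  have h8 := pvChainY_step n _ 4 h4
  have h16 := pvChainY_step n _ 8 h8
  have h32 := pvChainY_step n _ 16 h16
  unfold pvLoopY pvInvShr
  rw [show PySem.List.pyRange 31 (-1) (-1) = ((List.range' 0 32 1).map Int.ofNat).reverse from by decide,
    List.foldl_reverse]
  have hchar := pvLoopY_char y 32 (le_refl 32)
  rw [show (32 - 32 : Nat) = 0 from rfl] at hchar
  rw [hchar, hb]
  simp only [List.foldl_cons, List.foldl_nil, pvCastStepY]
  show ((pvAy y 32 : Nat) : Int) = _
  congr 1
  apply Nat.eq_of_testBit_eq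
  intro i
  rw [pvAy_testBit y 32 i (le_refl 32), h32 i]
  by_cases h : i < 32
  · rw [decide_eq_true (show 32 - 32 ≤ i ∧ i < 32 by omega)]
    rw [show pvSw n i (16+16) = pvSw n i 32 from rfl,
      show (32:Nat) = ((31-i)+1) + (31-(31-i)) from by omega, pvSw_add,
      show 31 - (31-i) = i from by omega,
      pvSw_high n hlt (i + ((31-i)+1)) (by omega)]
    have hs := pvSw_sfx n y hbits (31-i) (by omega)
    rw [show 31-(31-i) = i from by omega] at hs
    rw [hs]
    simp
  · rw [decide_eq_false (by omega), pvSw_high n hlt i (by omega)]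
    simp

-- ===== VERDICT (by name: the statement is the Claim_ definition above) =====
theorem reverse_tinymt_spec : Claim_equal_reverse_tinymt := by
  intro state _ _
  unfold Spec_reverse_tinymt reverse_tinymt reverse_tinymt_alt
  simp only [pvLoopX_eq_pvInvShl, pvLoopY_eq_pvInvShr]
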